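-- pv_equiv track=rewrite | github.com/charles66820/CREMIfiles | psc/tm2.py | EntierVersBinaire
-- ===== SOURCE A (Python) =====
-- def EntierVersBinaire(k,n):
--     L=[]
--     for i in range(k):
--         L.append(0)
--     for i in range(k-1,-1,-1):
--         if (n%2)==1:
--             L[i]=1
--         n = n//2
--     return tuple(L)
-- ===== SOURCE B (Python) =====
-- def EntierVersBinaire(k, n):
--     # Each bit is computed directly from its position: index i holds bit
--     # (k-1-i) of n, read off by an arithmetic right shift -- no zero-filled
--     # list and no threaded halved accumulator.
--     return tuple((n >> (k - 1 - i)) % 2 for i in range(k))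
-- ===== Notes on version B (the rewrite author's own statement) =====
-- stated objective: idiomatic
-- what changed: Replaces the zero-filled list mutated right-to-left while halving n by a single comprehension that computes each bit independently from its position with an arithmetic right shift, (n >> (k-1-i)) % 2.
import Mathlib
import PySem

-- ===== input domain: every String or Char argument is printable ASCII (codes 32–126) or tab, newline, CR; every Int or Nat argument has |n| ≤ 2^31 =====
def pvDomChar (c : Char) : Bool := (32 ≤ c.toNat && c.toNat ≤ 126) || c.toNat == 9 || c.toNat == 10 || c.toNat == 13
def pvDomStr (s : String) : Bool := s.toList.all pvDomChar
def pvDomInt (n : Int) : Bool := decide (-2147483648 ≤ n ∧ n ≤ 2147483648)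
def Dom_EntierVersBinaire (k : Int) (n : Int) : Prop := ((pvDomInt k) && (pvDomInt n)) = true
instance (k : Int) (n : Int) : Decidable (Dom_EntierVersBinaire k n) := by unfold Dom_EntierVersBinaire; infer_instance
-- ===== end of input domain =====

-- B computes each bit independently from its position (floor division by a power
-- of two) instead of A's zero list mutated right-to-left while halving n;
-- objective: more idiomatic, same cost.

-- ===== PORT A =====
-- one loop body step of A's second loop: state is (L, n)
def pvStepA (s : List Int × Int) (i : Int) : List Int × Int :=
  -- i ranges over k-1 .. 0 here, so i is nonnegative and 'i.toNat' is exact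
  ((if PySem.Int.mod s.2 2 == 1 then s.1.set i.toNat 1 else s.1), PySem.Int.floordiv s.2 2)

def EntierVersBinaire (k : Int) (n : Int) : List Int :=
  let L := (PySem.List.pyRange 0 k 1).foldl (fun L _ => L ++ [(0 : Int)]) []
  ((PySem.List.pyRange (k - 1) (-1) (-1)).foldl pvStepA (L, n)).1

-- ===== PORT B =====
def EntierVersBinaire_alt (k : Int) (n : Int) : List Int :=
  -- 'n >> (k-1-i)': the shift amount k-1-i is nonnegative for every i in range(k), so '.toNat'
  -- is exact, and Lean's '>>>' on Int is Python's arithmetic right shift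
  (PySem.List.pyRange 0 k 1).map
    (fun i => PySem.Int.mod (n >>> (k - 1 - i).toNat) 2)

-- ===== PRECONDITION & SPEC =====
def Spec_EntierVersBinaire (k : Int) (n : Int) (out : List Int) : Prop := out = EntierVersBinaire_alt k n
instance (k : Int) (n : Int) (out : List Int) : Decidable (Spec_EntierVersBinaire k n out) := by unfold Spec_EntierVersBinaire; infer_instance

-- ===== CLAIM (what is proved, stated in full; the proofs are below) =====
def Claim_equal_EntierVersBinaire : Prop := ∀ (k : Int) (n : Int), Dom_EntierVersBinaire k n → Spec_EntierVersBinaire k n (EntierVersBinaire k n)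

-- ===== LEMMAS AND PROOFS =====

-- A's first loop builds a list of zeros
theorem pvFoldZeros (xs : List Int) (init : List Int) :
    xs.foldl (fun L _ => L ++ [(0 : Int)]) init = init ++ List.replicate xs.length 0 := by
  induction xs generalizing init with
  | nil => simp
  | cons x xs ih => rw [List.foldl_cons, ih]; simp [List.replicate_succ]

-- writing at an index inside L ignores a trailing element
theorem pvSetAppend (L : List Int) (b a : Int) (i : Nat) (h : i < L.length) :
    (L ++ [b]).set i a = L.set i a ++ [b] :=
  List.set_append_left i a h

-- writing at the index just past L hits the trailing element
theorem pvSetLast (L : List Int) (b a : Int) : (L ++ [b]).set L.length a = L ++ [a] := by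
  rw [List.set_append_right _ _ (le_refl _)]
  simp

-- A's second loop ignores a trailing element it never writes to
theorem pvLoopA_append (idxs : List Int) (L : List Int) (b : Int) (n : Int)
    (h : ∀ i ∈ idxs, 0 ≤ i ∧ i.toNat < L.length) :
    (idxs.foldl pvStepA (L ++ [b], n)).1 = (idxs.foldl pvStepA (L, n)).1 ++ [b] := by
  induction idxs generalizing L n with
  | nil => simp
  | cons i idxs ih =>
    have hi := h i (by simp)
    simp only [List.foldl_cons]
    by_cases hm : (PySem.Int.mod n 2 == 1) = true
    · simp only [pvStepA, hm, if_true, pvSetAppend L b 1 i.toNat hi.2]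
      exact ih _ _ (fun j hj => by simpa [List.length_set] using h j (List.mem_cons_of_mem i hj))
    · simp only [pvStepA, hm]
      exact ih _ _ (fun j hj => h j (List.mem_cons_of_mem i hj))

-- Python's arithmetic right shift is floor division by a power of two
theorem pvShiftFloor (n : Int) (s : Nat) : n >>> s = PySem.Int.floordiv n ((2 : Int) ^ s) := by
  rw [Int.shiftRight_eq_div_pow, PySem.Int.floordiv_eq_ediv_of_pos (by positivity)]
  norm_cast

theorem pvFloorHalf (n c : Int) (hc : 0 < c) :
    PySem.Int.floordiv (PySem.Int.floordiv n 2) c = PySem.Int.floordiv n (2 * c) := by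
  have h1 : PySem.Int.floordiv n 2 = n / 2 := PySem.Int.floordiv_eq_ediv_of_pos (by norm_num)
  have h2 : PySem.Int.floordiv (n / 2) c = n / 2 / c := PySem.Int.floordiv_eq_ediv_of_pos hc
  have h3 : PySem.Int.floordiv n (2 * c) = n / (2 * c) := PySem.Int.floordiv_eq_ediv_of_pos (by positivity)
  rw [h1, h2, h3]
  exact Int.ediv_ediv_of_nonneg (by norm_num)

-- main induction on the natural number k
theorem pvMain (m : Nat) (n : Int) :
    EntierVersBinaire (m : Int) n = EntierVersBinaire_alt (m : Int) n := by
  induction m generalizing n with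
  | zero =>
    simp [EntierVersBinaire, EntierVersBinaire_alt,
      PySem.List.pyRange_one_eq_nil (a := 0) (b := 0) (le_refl 0),
      PySem.List.pyRange_neg_one_eq_nil]
  | succ m ih =>
    have hm : ((m + 1 : Nat) : Int) = (m : Int) + 1 := by push_cast; ring
    have hzero : (PySem.List.pyRange 0 ((m : Int) + 1) 1).foldl (fun L _ => L ++ [(0 : Int)]) []
        = List.replicate m 0 ++ [(0 : Int)] := by
      rw [pvFoldZeros, PySem.List.length_pyRange_one,
        show (((m : Int) + 1) - 0).toNat = m + 1 by omega]
      simp [List.replicate_succ']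
    have hidx : PySem.List.pyRange ((m : Int) + 1 - 1) (-1) (-1)
        = (m : Int) :: PySem.List.pyRange ((m : Int) - 1) (-1) (-1) := by
      rw [show ((m : Int) + 1 - 1) = (m : Int) by ring]
      exact PySem.List.pyRange_neg_one_cons (by omega)
    have hme : PySem.Int.mod n 2 = n % 2 := PySem.Int.mod_eq_emod_of_pos (by norm_num)
    -- the first iteration writes bit n%2 at the last position
    have hset : pvStepA (List.replicate m (0 : Int) ++ [(0 : Int)], n) (m : Int)
        = (List.replicate m (0 : Int) ++ [PySem.Int.mod n 2], PySem.Int.floordiv n 2) := by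
      have hl : ((m : Int)).toNat = (List.replicate m (0 : Int)).length := by simp
      rcases PySem.Int.mod_two_eq n with h | h
      · simp only [pvStepA]
        rw [if_neg (by rw [h]; decide), h]
      · simp only [pvStepA]
        rw [if_pos (by rw [h]; decide), hl, pvSetLast, h]
    have htail : ((PySem.List.pyRange ((m : Int) - 1) (-1) (-1)).foldl pvStepA
          (List.replicate m (0 : Int) ++ [PySem.Int.mod n 2], PySem.Int.floordiv n 2)).1
        = EntierVersBinaire (m : Int) (PySem.Int.floordiv n 2) ++ [PySem.Int.mod n 2] := by
      rw [pvLoopA_append]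
      · simp only [EntierVersBinaire, pvFoldZeros, PySem.List.length_pyRange_one,
          List.nil_append, show (((m : Int)) - 0).toNat = m by omega]
      · intro i hi
        rw [PySem.List.mem_pyRange_neg_one] at hi
        refine ⟨by omega, ?_⟩
        simp only [List.length_replicate]
        omega
    have hA : EntierVersBinaire ((m : Int) + 1) n
        = EntierVersBinaire (m : Int) (PySem.Int.floordiv n 2) ++ [PySem.Int.mod n 2] := by
      show ((PySem.List.pyRange ((m : Int) + 1 - 1) (-1) (-1)).foldl pvStepA
        ((PySem.List.pyRange 0 ((m : Int) + 1) 1).foldl (fun L _ => L ++ [(0 : Int)]) [], n)).1 = _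
      rw [hzero, hidx]
      rw [List.foldl_cons, hset]
      exact htail
    have hB : EntierVersBinaire_alt ((m : Int) + 1) n
        = EntierVersBinaire_alt (m : Int) (PySem.Int.floordiv n 2) ++ [PySem.Int.mod n 2] := by
      unfold EntierVersBinaire_alt
      simp only [pvShiftFloor]
      rw [PySem.List.pyRange_one_succ_right (by omega), List.map_append]
      congr 1
      · apply List.map_congr_left
        intro i hi
        rw [PySem.List.mem_pyRange_one] at hi
        have he : ((m : Int) + 1 - 1 - i).toNat = ((m : Int) - 1 - i).toNat + 1 := by omega
        rw [he, pow_succ, mul_comm ((2 : Int) ^ _) 2, ← pvFloorHalf _ _ (by positivity)]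
      · simp only [List.map_cons, List.map_nil, show ((m : Int) + 1 - 1 - (m : Int)).toNat = 0 by omega,
          pow_zero, PySem.Int.floordiv_eq_ediv_of_pos (a := n) (b := 1) (by norm_num),
          Int.ediv_one, hme]
    rw [hm, hA, hB, ih]

-- both sides are empty for k <= 0
theorem pvNonpos (k : Int) (n : Int) (hk : k ≤ 0) :
    EntierVersBinaire k n = EntierVersBinaire_alt k n := by
  simp [EntierVersBinaire, EntierVersBinaire_alt,
    PySem.List.pyRange_one_eq_nil (a := 0) (b := k) hk,
    PySem.List.pyRange_neg_one_eq_nil (a := k - 1) (b := -1) (by omega)]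

-- ===== VERDICT (by name: the statement is the Claim_ definition above) =====
theorem EntierVersBinaire_spec : Claim_equal_EntierVersBinaire := by
  intro k n _
  unfold Spec_EntierVersBinaire
  by_cases hk : k ≤ 0
  · exact pvNonpos k n hk
  · have hkk : k = ((k.toNat : Nat) : Int) := by omega
    rw [hkk]
    exact pvMain k.toNat n
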